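-- pv_equiv track=rewrite | github.com/EVVSK/Resume-Parser | Resume Parser/nlp.py | extract_education_section
-- ===== SOURCE A (Python) =====
-- def extract_education_section(text):
--     lines = text.split('\n')
--     start, end = None, None
--     for i, line in enumerate(lines):
--         if any(x in line.lower() for x in ["education", "academics", "qualification"]):
--             start = i
--             break
--     if start is not None:
--         for j in range(start + 1, len(lines)):
--             if any(x in lines[j].lower() for x in ["skills", "experience", "internship", "project", "certification", "additional information"]):
--                 end = j
--                 break
--         education_lines = lines[start + 1:end] if end else lines[start + 1:]
--         return [line.strip() for line in education_lines if line.strip()]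
--     return []
-- ===== SOURCE B (Python) =====
-- _EDU_KWS = ("education", "academics", "qualification")
-- _END_KWS = ("skills", "experience", "internship", "project", "certification", "additional information")
--
--
-- def extract_education_section(text):
--     # single pass with an in-section flag; no start/end indices, no slicing
--     in_section = False
--     result = []
--     for line in text.split('\n'):
--         if not in_section:
--             if any(x in line.lower() for x in _EDU_KWS):
--                 in_section = True
--         else:
--             if any(x in line.lower() for x in _END_KWS):
--                 break
--             s = line.strip()
--             if s:
--                 result.append(s)
--     return result
-- ===== Notes on version B (the rewrite author's own statement) =====
-- stated objective: simpler
-- what changed: Replaced the two index-computing scans plus slice-and-filter with one flagged pass over the lines that appends stripped non-empty lines between the education header and the first terminator.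
import Mathlib
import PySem

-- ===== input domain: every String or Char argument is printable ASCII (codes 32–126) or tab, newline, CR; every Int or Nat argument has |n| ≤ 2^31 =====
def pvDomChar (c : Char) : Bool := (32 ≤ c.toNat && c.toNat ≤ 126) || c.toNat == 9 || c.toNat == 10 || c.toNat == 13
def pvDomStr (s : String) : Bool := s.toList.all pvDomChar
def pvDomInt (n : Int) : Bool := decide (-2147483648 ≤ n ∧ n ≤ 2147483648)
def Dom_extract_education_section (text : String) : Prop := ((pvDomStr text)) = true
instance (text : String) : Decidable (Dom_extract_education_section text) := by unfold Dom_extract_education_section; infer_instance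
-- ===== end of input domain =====

-- B replaces A's two index-computing scans plus slice-and-filter by a single flagged pass (simpler decomposition, same result).

-- ===== PORT A =====
-- any(x in line.lower() for x in ["education", "academics", "qualification"])
def pvEduKw (line : String) : Bool :=
  ["education", "academics", "qualification"].any (fun x => PySem.Str.isIn x (PySem.Str.lower line))

-- any(x in line.lower() for x in ["skills", ..., "additional information"])
def pvEndKw (line : String) : Bool :=
  ["skills", "experience", "internship", "project", "certification", "additional information"].any
    (fun x => PySem.Str.isIn x (PySem.Str.lower line))

-- 'for i, line in enumerate(lines): if any(...): start = i; break'
def pvFindStart : List String → Nat → Option Nat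
  | [], _ => none
  | l :: rest, i => if pvEduKw l then some i else pvFindStart rest (i + 1)

-- 'for j in range(start+1, len(lines)): if any(... lines[j] ...): end = j; break'
-- (j is always in range, so List.getD with a dummy default is exact for lines[j])
def pvFindEnd (lines : List String) (j : Nat) : Option Nat :=
  if j < lines.length then
    (if pvEndKw (lines.getD j "") then some j else pvFindEnd lines (j + 1))
  else none
termination_by lines.length - j

def extract_education_section (text : String) : List String :=
  let lines := (PySem.Str.split? text "\n").getD []
  match pvFindStart lines 0 with
  | none => []
  | some start =>
    let end? := pvFindEnd lines (start + 1)
    -- 'lines[start+1:end] if end else lines[start+1:]'  (Python truthiness: end = 0 would also take the else branch)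
    let eduLines :=
      match end? with
      | some e =>
          if e ≠ 0 then PySem.List.slice lines (some ((start : Int) + 1)) (some ((e : Int)))
          else PySem.List.slice lines (some ((start : Int) + 1)) none
      | none => PySem.List.slice lines (some ((start : Int) + 1)) none
    (eduLines.filter (fun l => PySem.Str.strip l != "")).map PySem.Str.strip

-- ===== PORT B =====
-- one pass over the lines with an in-section flag; break on a terminator line
def pvScan : List String → Bool → List String
  | [], _ => []
  | line :: rest, false =>
      if pvEduKw line then pvScan rest true else pvScan rest false
  | line :: rest, true =>
      if pvEndKw line then []
      else
        let s := PySem.Str.strip line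
        if s != "" then s :: pvScan rest true else pvScan rest true

def extract_education_section_alt (text : String) : List String :=
  pvScan ((PySem.Str.split? text "\n").getD []) false

-- ===== PRECONDITION & SPEC =====
def Spec_extract_education_section (text : String) (out : List String) : Prop := out = extract_education_section_alt text
instance (text : String) (out : List String) : Decidable (Spec_extract_education_section text out) := by unfold Spec_extract_education_section; infer_instance

-- ===== CLAIM (what is proved, stated in full; the proofs are below) =====
def Claim_equal_extract_education_section : Prop := ∀ (text : String), Dom_extract_education_section text → Spec_extract_education_section text (extract_education_section text)

-- ===== LEMMAS AND PROOFS =====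

-- A's slice-and-filter, as a standalone function of the line list and the start index
def pvPostA (lines : List String) (start : Nat) : List String :=
  let end? := pvFindEnd lines (start + 1)
  let eduLines :=
    match end? with
    | some e =>
        if e ≠ 0 then PySem.List.slice lines (some ((start : Int) + 1)) (some ((e : Int)))
        else PySem.List.slice lines (some ((start : Int) + 1)) none
    | none => PySem.List.slice lines (some ((start : Int) + 1)) none
  (eduLines.filter (fun l => PySem.Str.strip l != "")).map PySem.Str.strip

theorem pvA_eq_post (text : String) :
    extract_education_section text =
      match pvFindStart ((PySem.Str.split? text "\n").getD []) 0 with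
      | none => []
      | some s => pvPostA ((PySem.Str.split? text "\n").getD []) s := rfl

-- the in-section phase of B is takeWhile-filter-map
theorem pvScan_true (suf : List String) :
    pvScan suf true =
      ((suf.takeWhile (fun l => !pvEndKw l)).filter (fun l => PySem.Str.strip l != "")).map PySem.Str.strip := by
  induction suf with
  | nil => simp [pvScan]
  | cons l rest ih =>
      by_cases h : pvEndKw l = true
      · simp [pvScan, h]
      · simp only [Bool.not_eq_true] at h
        by_cases hs : PySem.Str.strip l != ""
        · simp [pvScan, h, hs, ih]
        · simp [pvScan, h, hs, ih]

theorem pvFindEnd_eq (n : Nat) (lines : List String) (j : Nat)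
    (hn : lines.length - j = n) (hj : j ≤ lines.length) :
    pvFindEnd lines j = ((lines.drop j).findIdx? pvEndKw).map (j + ·) := by
  induction n generalizing j with
  | zero =>
      have hje : j = lines.length := by omega
      rw [pvFindEnd]
      simp [hje]
  | succ n ih =>
      have hlt : j < lines.length := by omega
      have hdrop : lines.drop j = lines[j] :: lines.drop (j + 1) :=
        List.drop_eq_getElem_cons hlt
      rw [pvFindEnd]
      rw [hdrop, List.findIdx?_cons]
      have hgd : lines.getD j "" = lines[j] := List.getD_eq_getElem lines "" hlt
      by_cases hk : pvEndKw lines[j] = true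
      · simp [hlt, hk]
      · simp only [hlt, if_true, hgd, hk, if_false, Bool.false_eq_true]
        rw [ih (j + 1) (by omega) (by omega), Option.map_map]
        congr 1
        funext m
        simp
        omega

theorem pvFindStart_shift (lines : List String) (i : Nat) :
    pvFindStart lines i = (pvFindStart lines 0).map (· + i) := by
  induction lines generalizing i with
  | nil => simp [pvFindStart]
  | cons l rest ih =>
      by_cases h : pvEduKw l = true
      · simp [pvFindStart, h]
      · simp only [pvFindStart, h, if_false, Bool.false_eq_true]
        rw [ih (i + 1), ih 1, Option.map_map]
        congr 1
        funext k
        simp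
        omega

theorem pvFindStart_lt (lines : List String) (i s : Nat) (h : pvFindStart lines i = some s) :
    s < i + lines.length := by
  induction lines generalizing i with
  | nil => simp [pvFindStart] at h
  | cons l rest ih =>
      by_cases hk : pvEduKw l = true
      · simp only [pvFindStart, hk, if_true, Option.some.injEq] at h
        simp [← h]
      · simp only [pvFindStart, hk, if_false, Bool.false_eq_true] at h
        have := ih (i + 1) h
        simp only [List.length_cons]
        omega

-- first terminator index k means: the kept part is the takeWhile prefix
theorem pv_take_findIdx (xs : List String) (k : Nat) (h : xs.findIdx? pvEndKw = some k) :
    xs.take k = xs.takeWhile (fun l => !pvEndKw l) := by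
  induction xs generalizing k with
  | nil => simp at h
  | cons a xs ih =>
      rw [List.findIdx?_cons] at h
      by_cases ha : pvEndKw a = true
      · simp only [ha, if_true, Option.some.injEq] at h
        simp [← h, ha]
      · simp only [ha, if_false, Bool.false_eq_true, Option.map_eq_some_iff] at h
        obtain ⟨k', hk', rfl⟩ := h
        simp [ha, ih k' hk']

theorem pv_takeWhile_of_none (xs : List String) (h : xs.findIdx? pvEndKw = none) :
    xs.takeWhile (fun l => !pvEndKw l) = xs := by
  induction xs with
  | nil => simp
  | cons a xs ih =>
      rw [List.findIdx?_cons] at h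
      by_cases ha : pvEndKw a = true
      · simp [ha] at h
      · simp only [ha, if_false, Bool.false_eq_true, Option.map_eq_none_iff] at h
        simp [ha, ih h]

theorem pvPostA_eq_scan (lines : List String) (s : Nat) (hs : s < lines.length) :
    pvPostA lines s = pvScan (lines.drop (s + 1)) true := by
  unfold pvPostA
  rw [pvFindEnd_eq (lines.length - (s + 1)) lines (s + 1) rfl (by omega)]
  rw [pvScan_true]
  cases hfi : (lines.drop (s + 1)).findIdx? pvEndKw with
  | none =>
      simp only [Option.map_none]
      have hc : ((s : Int) + 1) = (((s + 1 : Nat)) : Int) := by push_cast; ring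
      rw [hc, PySem.List.slice_from _ (by positivity)]
      simp only [Int.toNat_natCast]
      rw [pv_takeWhile_of_none _ hfi]
  | some k =>
      simp only [Option.map_some]
      have hne : s + 1 + k ≠ 0 := by omega
      simp only [hne, if_true, ne_eq, not_false_iff]
      have hc : ((s : Int) + 1) = (((s + 1 : Nat)) : Int) := by push_cast; ring
      rw [hc, PySem.List.slice_toNat _ (by positivity) (by positivity)]
      simp only [Int.toNat_natCast]
      have : s + 1 + k - (s + 1) = k := by omega
      rw [this, pv_take_findIdx _ k hfi]

theorem pvMain (lines : List String) :
    (match pvFindStart lines 0 with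
     | none => []
     | some s => pvPostA lines s) = pvScan lines false := by
  induction lines with
  | nil => simp [pvFindStart, pvScan]
  | cons l rest ih =>
      by_cases h : pvEduKw l = true
      · simp only [pvFindStart, h, if_true]
        rw [pvPostA_eq_scan (l :: rest) 0 (by simp)]
        simp [pvScan, h]
      · simp only [pvFindStart, h, if_false, Bool.false_eq_true]
        rw [pvFindStart_shift rest 1]
        cases hfs : pvFindStart rest 0 with
        | none =>
            have ih' : ([] : List String) = pvScan rest false := by rw [hfs] at ih; exact ih
            simp only [Option.map_none]
            simp [pvScan, h, ← ih']
        | some s =>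
            have hlt : s < rest.length := by
              have := pvFindStart_lt rest 0 s hfs; omega
            have ih' : pvPostA rest s = pvScan rest false := by rw [hfs] at ih; exact ih
            simp only [Option.map_some]
            show pvPostA (l :: rest) (s + 1) = pvScan (l :: rest) false
            rw [pvPostA_eq_scan (l :: rest) (s + 1) (by simp; omega)]
            rw [pvPostA_eq_scan rest s hlt] at ih'
            simp only [pvScan, h, if_false, Bool.false_eq_true]
            rw [← ih']
            rfl

-- ===== VERDICT (by name: the statement is the Claim_ definition above) =====
theorem extract_education_section_spec : Claim_equal_extract_education_section := by
  intro text _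
  unfold Spec_extract_education_section extract_education_section_alt
  rw [pvA_eq_post]
  exact pvMain _
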